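-- pv_equiv track=rewrite | github.com/sohcahtoa08/Python-2014 | Week1Problem7.py | decipher_fence
-- ===== SOURCE A (Python) =====
-- def return_rails(text, numRails):
--     '''return_rails(text, numRails) -> list
--     returns list of *numRails* rails for inputted text'''
--     rails = [] # initialize empty list named 'rails'
--     for n in range(numRails): # for loop that repeats 'numRails' times
--         rails.append(text[n::numRails]) # start at the nth position in 'plaintext' and add every 'numRail'th letter to an element in the 'rails' list
--     rails.reverse() # reverse the order of the elements in 'rails'
--     return rails # return the list of 'rails'
--
-- def decipher_fence(ciphertext,numRails):
--     '''decipher_fence(ciphertext,numRails) -> str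
--     returns decoding of ciphertext using railfence cipher
--     with numRails rails'''
--     decipheredText = '' # initialize empty string named 'decipheredText'
--     rails = return_rails(ciphertext, numRails) # assign the rails of ciphertext to a variable 'rails'
--     newRails = [] # initialize empty list named 'newRails'
--     x = 0 # initialize variable 'x' to 0
--     y = 0 # initialize variable 'y' to 0
--     for rail in rails: # for each rail in 'rails'...
--         y += len(rail) # add the length of the rail to variable 'y'
--         newRails.append(ciphertext[x:y]) # add characters x to y (slicing) to list 'newRails'
--         x = y # x is assigned the value of y
--     newRails.reverse() # reverse the order of the elements in 'newRails'
--     for i in range(len(newRails[0])): # for i in range(length of the first rail in 'newRails)...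
--         for rail in newRails: # for each rail in 'newRails'...
--             if len(rail) <= i: # if the length of the rail is less than or equal to loop variable i...
--                 continue # continue back to the top of the for loop
--             else: # else...
--                 decipheredText += rail[i] # add the character in it 'i'th position of the rail to 'decipheredText'
--     return decipheredText # return 'decipheredText'
-- ===== SOURCE B (Python) =====
-- def decipher_fence(ciphertext, numRails):
--     '''decipher_fence(ciphertext,numRails) -> str
--     returns decoding of ciphertext using railfence cipher
--     with numRails rails'''
--     n = len(ciphertext)
--     # rail k holds the plaintext positions k, k+numRails, ... ; its length is
--     # ceil((n - k) / numRails).  The rails were laid out back-to-front in the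
--     # ciphertext, so rail k starts after all rails j > k: accumulate suffix sums.
--     starts = []
--     acc = 0
--     for k in range(numRails - 1, -1, -1):
--         starts.append(acc)
--         acc += (n - k + numRails - 1) // numRails
--     starts.reverse()
--     # one flat pass: plaintext position p sits on rail p % numRails, column p // numRails
--     return ''.join(ciphertext[starts[p % numRails] + p // numRails]
--                    for p in range(n))
-- ===== Notes on version B (the rewrite author's own statement) =====
-- stated objective: alternative
-- what changed: Instead of materialising the step-slices, cutting the ciphertext into rail chunks and reading them column by column in a nested loop, B computes each rail's length and start offset arithmetically and emits the plaintext in one flat pass via direct index arithmetic ciphertext[starts[p % numRails] + p // numRails].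
import Mathlib
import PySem

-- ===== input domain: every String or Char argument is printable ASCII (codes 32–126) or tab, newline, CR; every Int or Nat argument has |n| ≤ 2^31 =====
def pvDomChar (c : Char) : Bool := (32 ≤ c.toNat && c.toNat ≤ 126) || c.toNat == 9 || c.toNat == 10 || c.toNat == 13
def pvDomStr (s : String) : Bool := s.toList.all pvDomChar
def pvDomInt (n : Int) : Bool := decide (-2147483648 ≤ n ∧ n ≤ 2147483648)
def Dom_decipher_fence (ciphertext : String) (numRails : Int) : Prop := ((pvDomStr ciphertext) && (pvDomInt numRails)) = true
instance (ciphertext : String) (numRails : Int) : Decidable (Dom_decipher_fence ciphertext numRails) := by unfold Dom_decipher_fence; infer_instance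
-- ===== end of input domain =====

-- B replaces A's slice-chunk-and-transpose decoding by an arithmetic offset table read in one flat pass (alternative decomposition, same result).


-- ===== PORT A =====
def return_railsPort (text : List Char) (numRails : Int) : List (List Char) :=
  -- 'for n in range(numRails): rails.append(text[n::numRails])', then 'rails.reverse()'
  ((PySem.List.pyRange 0 numRails 1).map
    (fun n => (PySem.List.slice? text (some n) none numRails).getD [])).reverse

def decipher_fence (ciphertext : String) (numRails : Int) : String :=
  let cs := ciphertext.toList
  let rails := return_railsPort cs numRails
  -- Python appends each slice into newRails and finally calls newRails.reverse();
  -- the fold below prepends, which builds that reversed list directly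
  let step := rails.foldl
     (fun (st : List (List Char) × Int × Int) rail =>
        let y := st.2.2 + (rail.length : Int)
        (PySem.List.slice cs (some st.2.1) (some y) :: st.1, y, y)) ([], 0, 0)
  let newRails := step.1
  -- newRails[0] raises IndexError when numRails ≤ 0 (newRails is empty); excluded by Pre_
  let first := PySem.List.pyGetD newRails 0 []
  let out := (PySem.List.pyRange 0 (first.length : Int) 1).foldl
     (fun acc i =>
        newRails.foldl (fun acc rail =>
          if (rail.length : Int) ≤ i then acc
          else acc ++ [PySem.List.pyGetD rail i ' ']) acc) []
  String.ofList out

-- ===== PORT B =====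
def decipher_fence_alt (ciphertext : String) (numRails : Int) : String :=
  let cs := ciphertext.toList
  let n : Int := PySem.List.len cs
  -- 'starts.append(acc); acc += ceil((n-k)/numRails)' over range(numRails-1, -1, -1),
  -- then 'starts.reverse()': the fold prepends, which builds that reversed list directly
  let starts := ((PySem.List.pyRange (numRails - 1) (-1) (-1)).foldl
      (fun (st : Int × List Int) k =>
        (st.1 + PySem.Int.floordiv (n - k + numRails - 1) numRails, st.1 :: st.2)) (0, [])).2
  let out := (PySem.List.pyRange 0 n 1).map
      (fun p => PySem.List.pyGetD cs
          (PySem.List.pyGetD starts (PySem.Int.mod p numRails) 0 + PySem.Int.floordiv p numRails) ' ')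
  String.ofList out

-- ===== PRECONDITION & SPEC =====
-- A raises IndexError (newRails[0] on the empty list) for every numRails ≤ 0
def Pre_decipher_fence (ciphertext : String) (numRails : Int) : Prop := 1 ≤ numRails
instance (ciphertext : String) (numRails : Int) : Decidable (Pre_decipher_fence ciphertext numRails) := by unfold Pre_decipher_fence; infer_instance
def pvWitness_decipher_fence : String × Int := ("WECRLTEERDSOEEFEAOCAIVDEN", 3)

def Spec_decipher_fence (ciphertext : String) (numRails : Int) (out : String) : Prop := out = decipher_fence_alt ciphertext numRails
instance (ciphertext : String) (numRails : Int) (out : String) : Decidable (Spec_decipher_fence ciphertext numRails out) := by unfold Spec_decipher_fence; infer_instance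

-- ===== CLAIM (what is proved, stated in full; the proofs are below) =====
def Claim_equal_decipher_fence : Prop := ∀ (ciphertext : String) (numRails : Int), Dom_decipher_fence ciphertext numRails → Pre_decipher_fence ciphertext numRails → Spec_decipher_fence ciphertext numRails (decipher_fence ciphertext numRails)

-- ===== LEMMAS AND PROOFS =====

-- length of rail k: ceil((n-k)/r) in Nat arithmetic
def pvL (n r k : Nat) : Nat := (n - k + r - 1) / r
-- suffix sum of rail lengths from rail k on
def pvS (n r k : Nat) : Nat := ((List.range (r - k)).map (fun j => pvL n r (k + j))).sum
-- chunks of cs from offset x with the given lengths (A's newRails before the final reverse)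
def pvChunks (cs : List Char) (x : Nat) : List Nat → List (List Char)
  | [] => []
  | l :: ls => ((cs.drop x).take l) :: pvChunks cs (x + l) ls
-- the same chunks read back-to-front: the chunk of length l is preceded (in cs) by all later lengths
def pvRevChunks (cs : List Char) : List Nat → List (List Char)
  | [] => []
  | l :: ls => ((cs.drop ls.sum).take l) :: pvRevChunks cs ls

lemma pvS_succ (n r k : Nat) (hk : k < r) : pvS n r k = pvL n r k + pvS n r (k + 1) := by
  unfold pvS
  rw [show r - k = (r - (k+1)) + 1 from by omega, List.range_succ_eq_map]
  simp only [List.map_cons, List.map_map, List.sum_cons, Nat.add_zero]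
  congr 2
  apply List.map_congr_left
  intro j _
  simp only [Function.comp_apply]
  congr 1
  omega


lemma Lstep (n r k : Nat) (hr : r ≤ n) (hk : k < r) (hr1 : 1 ≤ r) :
    pvL n r k = pvL (n - r) r k + 1 := by
  unfold pvL
  rcases Nat.le_total k (n - r) with h | h
  · rw [show n - k + r - 1 = ((n - r) - k + r - 1) + r from by omega, Nat.add_div_right _ (by omega)]
  · have h1 : (n - r) - k = 0 := by omega
    rw [h1]
    have h2 : r ≤ n - k + r - 1 := by omega
    have h3 : n - k + r - 1 < 2 * r := by omega
    rw [Nat.div_eq_sub_div (by omega) h2, Nat.div_eq_of_lt (by omega), Nat.div_eq_of_lt (by omega)]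


lemma pvS_zero_le (r : Nat) (hr : 1 ≤ r) : ∀ n, pvS n r 0 ≤ n := by
  intro n
  induction n using Nat.strong_induction_on with
  | _ n ih =>
    rcases Nat.le_total r n with h | h
    · have step : pvS n r 0 = pvS (n - r) r 0 + r := by
        unfold pvS
        simp only [Nat.sub_zero, Nat.zero_add]
        have : ∀ k ∈ List.range r, pvL n r k = pvL (n - r) r k + 1 := by
          intro k hk
          exact Lstep n r k h (List.mem_range.mp hk) hr
        rw [List.map_congr_left this]
        rw [show (fun k => pvL (n - r) r k + 1) = fun k => pvL (n - r) r k + (fun _ => 1) k from rfl]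
        rw [List.sum_map_add]
        simp
      have := ih (n - r) (by omega)
      omega
    · -- n < r : each term ≤ 1, terms with k ≥ n are 0
      unfold pvS
      simp only [Nat.sub_zero, Nat.zero_add]
      rw [show List.range r = List.range n ++ (List.range (r - n)).map (n + ·) from by rw [← List.range_add]; congr 1; omega, List.map_append, List.sum_append]
      have h1 : ((List.range n).map (fun j => pvL n r j)).sum ≤ n := by
        calc ((List.range n).map (fun j => pvL n r j)).sum ≤ (((List.range n).map (fun j => pvL n r j)).length) * 1 := by
              apply List.sum_le_card_nsmul
              intro x hx
              obtain ⟨k, hk, rfl⟩ := List.mem_map.mp hx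
              unfold pvL
              have h2 : n - k + r - 1 < 2 * r := by omega
              have := (Nat.div_lt_iff_lt_mul (by omega : 0 < r)).mpr (by omega : n - k + r - 1 < 2 * r)
              omega
          _ = n := by simp
      have h2 : ((List.map (fun x => n + x) (List.range (r - n))).map (fun j => pvL n r j)).sum = 0 := by
        rw [List.map_map]
        apply List.sum_eq_zero
        intro x hx
        obtain ⟨k, hk, rfl⟩ := List.mem_map.mp hx
        simp only [Function.comp]
        unfold pvL
        have : n - (n + k) = 0 := by omega
        rw [this]
        exact Nat.div_eq_of_lt (by omega)
      omega

lemma pvS_le (n r : Nat) (hr : 1 ≤ r) : ∀ k, pvS n r k ≤ n := by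
  intro k
  induction k with
  | zero => exact pvS_zero_le r hr n
  | succ k ih =>
    by_cases hk : k < r
    · have := pvS_succ n r k hk
      omega
    · unfold pvS
      rw [show r - (k+1) = 0 from by omega]
      simp


lemma pvL_lt_iff (n r k i : Nat) (hr : 1 ≤ r) : i < pvL n r k ↔ i * r + k < n := by
  unfold pvL
  rw [show (i < (n - k + r - 1) / r) ↔ (i + 1 ≤ (n - k + r - 1) / r) from Iff.rfl,
      Nat.le_div_iff_mul_le (by omega), show (i+1)*r = i*r + r from by ring]
  generalize i * r = t
  omega


lemma sliceStep_len (cs : List Char) (k r : Nat) (hr : 1 ≤ r) :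
    ((PySem.List.slice? cs (some (k : Int)) none (r : Int)).getD []).length = pvL cs.length r k := by
  unfold PySem.List.slice? PySem.List.sliceIndices
  have hrne : (r : Int) ≠ 0 := by omega
  have hrnlt : ¬ ((r : Int) < 0) := by omega
  have hknlt : ¬ ((k : Int) < 0) := by omega
  simp only [if_neg hrne, if_neg hrnlt, if_neg hknlt]
  set n := cs.length with hn
  by_cases hlt : min (k : Int) (n : Int) < (n : Int)
  · rw [if_pos hlt, if_pos (by omega : (0:Int) < (r:Int))]
    have hkn : k < n := by omega
    rw [show min (k : Int) (n : Int) = (k : Int) from by omega]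
    have hnum : ((n : Int) - (k : Int) + (r : Int) - 1) = ((n - k + r - 1 : Nat) : Int) := by omega
    have hcount : (((n : Int) - (k : Int) + (r : Int) - 1) / (r : Int)).toNat = pvL n r k := by
      rw [hnum, ← Int.natCast_div, Int.toNat_natCast]; rfl
    rw [hcount, Option.getD_some]
    rw [List.filterMap_length_eq_length.mpr]
    · exact List.length_range ..
    · intro x hx
      have hxlt : x < pvL n r k := List.mem_range.mp hx
      have hbound : x * r + k < n := (pvL_lt_iff n r k x hr).mp hxlt
      have hidx : ((k : Int) + (r : Int) * (x : Int)) = ((k + r * x : Nat) : Int) := by push_cast; ring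
      rw [hidx, Int.toNat_natCast]
      have : k + r * x < cs.length := by rw [hn] at hbound; rw [Nat.mul_comm r x]; omega
      simp only [this, getElem?_pos, Option.isSome_some]
  · rw [if_neg hlt, if_pos (by omega : (0:Int) < (r:Int))]
    simp only [List.range_zero, List.filterMap_nil, Option.getD_some, List.length_nil]
    have hk : n ≤ k := by omega
    unfold pvL
    rw [show n - k = 0 from by omega]
    exact (Nat.div_eq_of_lt (by omega)).symm

lemma chunkFold (cs : List Char) (rs : List (List Char)) (acc : List (List Char)) (x : Nat) :
    (rs.foldl (fun (st : List (List Char) × Int × Int) rail =>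
        let y := st.2.2 + (rail.length : Int)
        (PySem.List.slice cs (some st.2.1) (some y) :: st.1, y, y))
      (acc, (x : Int), (x : Int))).1 = (pvChunks cs x (rs.map (·.length))).reverse ++ acc := by
  induction rs generalizing acc x with
  | nil => simp [pvChunks]
  | cons rail rs ih =>
    simp only [List.foldl_cons, List.map_cons, pvChunks]
    have hy : (x : Int) + (rail.length : Int) = ((x + rail.length : Nat) : Int) := by push_cast; ring
    rw [hy, PySem.List.slice_natCast, show x + rail.length - x = rail.length from by omega]
    rw [ih ((cs.drop x).take rail.length :: acc) (x + rail.length)]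
    simp

lemma pvChunks_append (cs : List Char) (u v : List Nat) (x : Nat) :
    pvChunks cs x (u ++ v) = pvChunks cs x u ++ pvChunks cs (x + u.sum) v := by
  induction u generalizing x with
  | nil => simp [pvChunks]
  | cons a t ih =>
    simp only [List.cons_append, pvChunks, List.sum_cons, ih (x + a)]
    simp [Nat.add_assoc]


lemma pvChunks_rev (cs : List Char) (ls : List Nat) :
    (pvChunks cs 0 ls.reverse).reverse = pvRevChunks cs ls := by
  induction ls with
  | nil => simp [pvChunks, pvRevChunks]
  | cons a t ih =>
    simp only [List.reverse_cons, pvChunks_append, pvRevChunks]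
    simp only [pvChunks, List.reverse_append, List.reverse_cons, List.reverse_nil]
    simp [ih, List.sum_reverse]


lemma pvRevChunks_length (cs : List Char) (ls : List Nat) : (pvRevChunks cs ls).length = ls.length := by
  induction ls with
  | nil => rfl
  | cons a t ih => simp [pvRevChunks, ih]


lemma pvRevChunks_getElem (cs : List Char) (ls : List Nat) (k : Nat) (h : k < ls.length) :
    (pvRevChunks cs ls)[k]'(by rw [pvRevChunks_length]; exact h)
      = (cs.drop ((ls.drop (k+1)).sum)).take (ls[k]) := by
  induction ls generalizing k with
  | nil => simp at h
  | cons a t ih =>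
    cases k with
    | zero => simp [pvRevChunks]
    | succ k =>
      simp only [pvRevChunks, List.getElem_cons_succ, List.drop_succ_cons]
      exact ih k (by simpa using h)


lemma range_drop (m r : Nat) (h : m ≤ r) :
    (List.range r).drop m = (List.range (r - m)).map (m + ·) := by
  rw [show r = m + (r - m) from by omega, List.range_add]
  simp [List.drop_left']


lemma foldl_skip_shape {α β : Type} (l : List α) (P : α → Prop) [DecidablePred P] (f : α → β) (acc : List β) :
    l.foldl (fun acc x => if P x then acc else acc ++ [f x]) acc
      = acc ++ (l.filter (fun x => decide (¬ P x))).map f := by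
  rw [show (fun (acc : List β) x => if P x then acc else acc ++ [f x])
        = fun acc x => if ¬ P x then acc ++ [f x] else acc from by
    funext a x; by_cases h : P x <;> simp [h]]
  exact PySem.List.foldl_append_ite _ _ _ _

lemma newRails_eq (cs : List Char) (r : Nat) :
    pvRevChunks cs ((List.range r).map (fun k => pvL cs.length r k))
      = (List.range r).map (fun k => (cs.drop (pvS cs.length r (k+1))).take (pvL cs.length r k)) := by
  set n := cs.length
  apply List.ext_getElem
  · simp [pvRevChunks_length]
  · intro k h1 h2
    have hk : k < r := by simpa [pvRevChunks_length] using h1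
    rw [pvRevChunks_getElem cs _ k (by simpa using hk)]
    simp only [List.getElem_map, List.getElem_range]
    congr 1
    rw [← List.map_drop, range_drop (k+1) r (by omega), List.map_map]
    unfold pvS
    congr 1


lemma chunk_length (cs : List Char) (r k : Nat) (hr : 1 ≤ r) (hk : k < r) :
    ((cs.drop (pvS cs.length r (k+1))).take (pvL cs.length r k)).length = pvL cs.length r k := by
  have h1 := pvS_succ cs.length r k hk
  have h2 := pvS_le cs.length r hr k
  simp only [List.length_take, List.length_drop]
  omega

lemma startsFold (g : Int → Int) (m : Nat) (a : Int) (st : List Int) :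
    ((PySem.List.pyRange ((m : Int) - 1) (-1) (-1)).foldl
        (fun (s : Int × List Int) k => (s.1 + g k, s.1 :: s.2)) (a, st)).2
      = (List.range m).map (fun k =>
          a + ((List.range (m - (k+1))).map (fun j => g ((k+1+j : Nat) : Int))).sum) ++ st := by
  induction m generalizing a st with
  | zero =>
    rw [PySem.List.pyRange_neg_one_eq_nil (by omega)]
    simp
  | succ m ih =>
    rw [show ((m+1 : Nat) : Int) - 1 = (m : Int) from by push_cast; ring]
    rw [PySem.List.pyRange_neg_one_cons (by omega : (-1 : Int) < (m : Int))]
    simp only [List.foldl_cons]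
    rw [ih (a + g (m : Int)) (a :: st)]
    rw [List.range_succ, List.map_append, List.map_singleton]
    rw [show m + 1 - (m + 1) = 0 from by omega]
    simp only [List.range_zero, List.map_nil, List.sum_nil, Int.add_zero]
    rw [List.append_assoc, List.singleton_append]
    congr 1
    apply List.map_congr_left
    intro k hk
    have hkm : k < m := List.mem_range.mp hk
    rw [show m + 1 - (k + 1) = (m - (k+1)) + 1 from by omega, List.range_succ, List.map_append,
        List.sum_append, List.map_singleton, List.sum_singleton]
    rw [show k + 1 + (m - (k + 1)) = m from by omega]
    ring


lemma pvLI_eq (n r k : Nat) (hr : 1 ≤ r) (hk : k < r) :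
    PySem.Int.floordiv ((n : Int) - (k : Int) + (r : Int) - 1) (r : Int) = (pvL n r k : Int) := by
  by_cases h : k ≤ n
  · rw [show (n : Int) - (k : Int) + (r : Int) - 1 = ((n - k + r - 1 : Nat) : Int) from by omega,
        PySem.Int.floordiv_natCast]
    rfl
  · have h0 : pvL n r k = 0 := by
      unfold pvL
      rw [show n - k = 0 from by omega]
      exact Nat.div_eq_of_lt (by omega)
    rw [h0]
    rw [PySem.Int.floordiv_eq_iff_of_pos (by omega)]
    constructor <;> [omega; omega]


lemma pvBlocks (r : Nat) (hr : 1 ≤ r) : ∀ (c : Nat) (f : Nat → Char) (n : Nat), n ≤ c * r →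
    (List.range n).map f
      = (List.range c).flatMap (fun i =>
          ((List.range r).filter (fun k => decide (i * r + k < n))).map (fun k => f (i * r + k))) := by
  intro c
  induction c with
  | zero =>
    intro f n hn
    simp at hn
    simp [hn]
  | succ c ih =>
    intro f n hn
    rw [List.range_succ_eq_map, List.flatMap_cons]
    by_cases hnr : r ≤ n
    · have hsplit : List.range n = List.range r ++ (List.range (n - r)).map (r + ·) := by
        rw [← List.range_add]; congr 1; omega
      rw [hsplit, List.map_append, List.map_map]
      congr 1
      · rw [List.filter_eq_self.mpr (by
          intro k hkmem
          have := List.mem_range.mp hkmem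
          simp; omega)]
        apply List.map_congr_left
        intro k _
        simp
      · have hcr : (c + 1) * r = c * r + r := by ring
        have ih' := ih (fun p => f (r + p)) (n - r) (by omega)
        have hl : List.map (f ∘ fun x => r + x) (List.range (n - r))
            = List.map (fun p => f (r + p)) (List.range (n - r)) := by
          apply List.map_congr_left; intro p _; rfl
        rw [hl, ih', List.flatMap_map]
        apply List.flatMap_congr
        intro a ha
        have hsm : a.succ * r = a * r + r := by rw [Nat.succ_mul]
        have hfil : (List.range r).filter (fun k => decide (a * r + k < n - r))
            = (List.range r).filter (fun k => decide (a.succ * r + k < n)) := by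
          apply List.filter_congr
          intro k _
          rw [hsm]
          simp only [decide_eq_decide]
          omega
        rw [hfil]
        apply List.map_congr_left
        intro k _
        show f (r + (a * r + k)) = f (a.succ * r + k)
        congr 1
        have := Nat.succ_mul a r
        omega
    · have h0 : List.range n = (List.range r).filter (fun k => decide (0 * r + k < n)) := by
        rw [show List.range r = List.range n ++ (List.range (r - n)).map (n + ·) from by
              rw [← List.range_add]; congr 1; omega]
        rw [List.filter_append]
        rw [List.filter_eq_self.mpr (by intro k hkmem; have := List.mem_range.mp hkmem; simp; omega)]
        rw [List.filter_eq_nil_iff.mpr (by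
          intro k hkmem
          obtain ⟨j, hj, rfl⟩ := List.mem_map.mp hkmem
          simp only [decide_eq_true_eq, Nat.zero_mul]
          omega)]
        simp
      have hrest : List.flatMap (fun i =>
            ((List.range r).filter (fun k => decide (i * r + k < n))).map (fun k => f (i * r + k)))
          ((List.range c).map Nat.succ) = [] := by
        apply List.flatMap_eq_nil_iff.mpr
        intro i hi
        obtain ⟨a, _, rfl⟩ := List.mem_map.mp hi
        rw [List.filter_eq_nil_iff.mpr (by
          intro k _
          have hsm : a.succ * r = a * r + r := by rw [Nat.succ_mul]
          simp only [decide_eq_true_eq]  -- keep simple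
          omega)]
        simp
      rw [hrest, List.append_nil, ← h0]
      apply List.map_congr_left
      intro k _
      congr 1
      omega

lemma A_eq (s : String) (r : Nat) (hr : 1 ≤ r) :
    decipher_fence s (r : Int)
      = String.ofList ((List.range (pvL s.toList.length r 0)).flatMap (fun i =>
          ((List.range r).filter (fun k => decide (i < pvL s.toList.length r k))).map
            (fun k => s.toList.getD (pvS s.toList.length r (k+1) + i) ' '))) := by
  unfold decipher_fence return_railsPort
  set cs := s.toList with hcs
  simp only []
  -- rails loop
  rw [PySem.List.pyRange_zero_nat r]
  -- lengths of the step slices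
  have hrails : ((List.map (fun (n : Int) => (PySem.List.slice? cs (some n) none (r:Int)).getD [])
        (List.map (fun (k : Nat) => ((k : Int))) (List.range r))).reverse).map (·.length)
      = ((List.range r).map (fun k => pvL cs.length r k)).reverse := by
    rw [List.map_reverse, List.map_map, List.map_map]
    congr 1
    apply List.map_congr_left
    intro k _
    exact sliceStep_len cs k r hr
  -- chunk fold
  rw [show ((0:Int), (0:Int)) = (((0:Nat):Int), ((0:Nat):Int)) from by norm_num]
  rw [chunkFold cs _ [] 0, List.append_nil, hrails]
  rw [pvChunks_rev, newRails_eq]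
  rw [PySem.List.pyGetD_zero]
  rw [PySem.List.getD_map_range _ r 0 [] (by omega)]
  rw [chunk_length cs r 0 hr (by omega)]
  rw [PySem.List.pyRange_zero_nat, List.foldl_map]
  have hinner : ∀ (acc : List Char) (i : Nat), i ∈ List.range (pvL cs.length r 0) →
      (List.foldl (fun acc rail => if ((rail.length : Int)) ≤ ((i : Nat) : Int) then acc else acc ++ [PySem.List.pyGetD rail ((i : Nat) : Int) ' ']) acc
        ((List.range r).map (fun k => (cs.drop (pvS cs.length r (k+1))).take (pvL cs.length r k))))
      = acc ++ ((List.range r).filter (fun k => decide (i < pvL cs.length r k))).map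
            (fun k => cs.getD (pvS cs.length r (k+1) + i) ' ') := by
    intro acc i _
    rw [foldl_skip_shape _ (fun rail => ((rail.length : Int)) ≤ ((i : Nat) : Int))
        (fun rail => PySem.List.pyGetD rail ((i : Nat) : Int) ' ') acc]
    congr 1
    rw [List.filter_map, List.map_map]
    have hfil : (List.range r).filter ((fun rail => decide (¬ ((rail.length : Int)) ≤ ((i : Nat) : Int))) ∘ (fun k => (cs.drop (pvS cs.length r (k+1))).take (pvL cs.length r k)))
        = (List.range r).filter (fun k => decide (i < pvL cs.length r k)) := by
      apply List.filter_congr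
      intro k hk
      simp only [Function.comp_apply]
      rw [chunk_length cs r k hr (List.mem_range.mp hk)]
      rw [decide_eq_decide]
      omega
    rw [hfil]
    apply List.map_congr_left
    intro k hk
    have hmem := List.mem_filter.mp hk
    have hklt : k < r := List.mem_range.mp hmem.1
    have hiL : i < pvL cs.length r k := of_decide_eq_true hmem.2
    simp only [Function.comp_apply]
    rw [PySem.List.pyGetD_natCast]
    rw [List.getD_eq_getElem?_getD, List.getElem?_take_of_lt hiL, List.getElem?_drop,
        ← List.getD_eq_getElem?_getD]
  rw [PySem.List.foldl_congr_mem _ _ _ _ hinner]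
  rw [PySem.List.foldl_append_eq_flatMap, List.nil_append]

lemma B_eq (s : String) (r : Nat) (hr : 1 ≤ r) :
    decipher_fence_alt s (r : Int)
      = String.ofList ((List.range s.toList.length).map
          (fun p => s.toList.getD (pvS s.toList.length r (p % r + 1) + p / r) ' ')) := by
  unfold decipher_fence_alt
  set cs := s.toList with hcs
  simp only [PySem.List.len_eq]
  rw [startsFold _ r 0 []]
  rw [List.append_nil]
  have hF : ∀ k : Nat, k < r →
      (0 : Int) + ((List.range (r - (k+1))).map
          (fun j => PySem.Int.floordiv (((cs.length : Int)) - ((k+1+j : Nat) : Int) + (r : Int) - 1) (r : Int))).sum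
        = (pvS cs.length r (k+1) : Int) := by
    intro k hk
    have helem : ∀ j ∈ List.range (r - (k+1)),
        PySem.Int.floordiv (((cs.length : Int)) - ((k+1+j : Nat) : Int) + (r : Int) - 1) (r : Int)
          = ((pvL cs.length r (k+1+j) : Nat) : Int) := by
      intro j hj
      have hjlt : j < r - (k+1) := List.mem_range.mp hj
      exact pvLI_eq cs.length r (k+1+j) hr (by omega)
    rw [List.map_congr_left helem, Int.zero_add]
    rw [show (fun j => ((pvL cs.length r (k+1+j) : Nat) : Int)) = (fun (t : Nat) => (t : Int)) ∘ (fun j => pvL cs.length r (k+1+j)) from rfl]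
    rw [← List.map_map, ← Nat.cast_list_sum]
    rfl
  rw [PySem.List.pyRange_zero_nat, List.map_map]
  congr 1
  apply List.map_congr_left
  intro p hp
  have hpn : p < cs.length := List.mem_range.mp hp
  simp only [Function.comp_apply]
  rw [PySem.Int.mod_natCast, PySem.Int.floordiv_natCast]
  rw [PySem.List.pyGetD_natCast]
  rw [PySem.List.getD_map_range _ r (p % r) 0 (Nat.mod_lt p (by omega))]
  rw [hF (p % r) (Nat.mod_lt p (by omega))]
  rw [show ((pvS cs.length r (p % r + 1) : Nat) : Int) + ((p / r : Nat) : Int)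
        = ((pvS cs.length r (p % r + 1) + p / r : Nat) : Int) from by push_cast; ring]
  rw [PySem.List.pyGetD_natCast]

lemma AB_eq (s : String) (numRails : Int) (hpre : 1 ≤ numRails) :
    decipher_fence s numRails = decipher_fence_alt s numRails := by
  obtain ⟨r, rfl⟩ : ∃ r : Nat, numRails = (r : Int) :=
    ⟨numRails.toNat, (Int.toNat_of_nonneg (by omega)).symm⟩
  have hr : 1 ≤ r := by exact_mod_cast hpre
  rw [A_eq s r hr, B_eq s r hr]
  set cs := s.toList with hcs
  set n := cs.length with hn
  congr 1
  have hbound : n ≤ pvL n r 0 * r := by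
    have hq := Nat.div_add_mod (n + r - 1) r
    have hm := Nat.mod_lt (n + r - 1) (by omega : 0 < r)
    rw [Nat.mul_comm]
    unfold pvL
    rw [Nat.sub_zero]
    omega
  rw [pvBlocks r hr (pvL n r 0) _ n hbound]
  apply List.flatMap_congr
  intro i _
  have hfil : (List.range r).filter (fun k => decide (i * r + k < n))
      = (List.range r).filter (fun k => decide (i < pvL n r k)) := by
    apply List.filter_congr
    intro k _
    rw [decide_eq_decide]
    exact (pvL_lt_iff n r k i hr).symm
  rw [hfil]
  apply List.map_congr_left
  intro k hk
  have hklt : k < r := List.mem_range.mp (List.mem_filter.mp hk).1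
  congr 1
  have hmod : (i * r + k) % r = k := by
    rw [Nat.mul_comm i r, Nat.mul_add_mod, Nat.mod_eq_of_lt hklt]
  have hdiv : (i * r + k) / r = i := by
    rw [Nat.mul_comm i r, Nat.mul_add_div (by omega : 0 < r), Nat.div_eq_of_lt hklt, Nat.add_zero]
  rw [hmod, hdiv]

-- ===== VERDICT (by name: the statement is the Claim_ definition above) =====
theorem decipher_fence_spec : Claim_equal_decipher_fence := by
  intro s numRails _hdom hpre
  unfold Spec_decipher_fence
  exact AB_eq s numRails hpre
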